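-- pv_equiv track=rewrite | github.com/Intain-AI/ind_credit | credit_app/bank_statement_functions/extracted_fields_df.py | check_DrCramountSameColumn
-- ===== SOURCE A (Python) =====
-- def check_DrCramountSameColumn(real_columns):
--     flagAmountDrCrMix = True # to check amount and Dr and Cr in same column
--     amount_index=0
--     for i,column in enumerate(real_columns):
--         if "amount" in column.lower():
--             amount_index=i
--             flagAmountDrCrMix = False
--     return flagAmountDrCrMix,amount_index
-- ===== SOURCE B (Python) =====
-- def check_DrCramountSameColumn(real_columns):
--     # Reverse early-exit scan: first match from the end == last match from the front.
--     for i in range(len(real_columns) - 1, -1, -1):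
--         if "amount" in real_columns[i].lower():
--             return (False, i)
--     return (True, 0)
-- ===== Notes on version B (the rewrite author's own statement) =====
-- stated objective: alternative
-- what changed: Replaces the forward overwriting sweep (flag + running index updated on every match) with a reverse index scan that returns immediately at the first match from the end, maintaining no accumulator.
import Mathlib
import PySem

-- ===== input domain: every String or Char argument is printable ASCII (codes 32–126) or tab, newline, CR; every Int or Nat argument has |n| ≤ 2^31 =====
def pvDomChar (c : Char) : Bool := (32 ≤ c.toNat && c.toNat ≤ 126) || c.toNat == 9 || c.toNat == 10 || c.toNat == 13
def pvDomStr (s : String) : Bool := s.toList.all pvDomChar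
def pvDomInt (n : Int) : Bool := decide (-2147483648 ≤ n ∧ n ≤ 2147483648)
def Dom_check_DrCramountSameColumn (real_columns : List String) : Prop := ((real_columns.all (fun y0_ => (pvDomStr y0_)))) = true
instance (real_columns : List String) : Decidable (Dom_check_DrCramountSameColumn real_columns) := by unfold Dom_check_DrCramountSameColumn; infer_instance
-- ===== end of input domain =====

-- B replaces A's forward overwriting sweep by a reverse early-exit index scan (alternative decomposition, same cost).

-- ===== PORT A =====
-- forward sweep: a (flag, index) accumulator overwritten on every match
def check_DrCramountSameColumn (real_columns : List String) : Bool × Int :=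
  (PySem.List.enumerate real_columns 0).foldl
    (fun st p =>
      if PySem.Str.isIn "amount" (PySem.Str.lower p.2) then (false, p.1) else st)
    (true, 0)

-- ===== PORT B =====
-- reverse scan: n counts down as in 'for i in range(len-1, -1, -1)'; first match returns at once
def pvAltGo (real_columns : List String) : Nat → Bool × Int
  | 0 => (true, 0)
  | n + 1 =>
    if PySem.Str.isIn "amount" (PySem.Str.lower (PySem.List.pyGetD real_columns (n : Int) "")) then
      (false, (n : Int))
    else pvAltGo real_columns n

def check_DrCramountSameColumn_alt (real_columns : List String) : Bool × Int :=
  pvAltGo real_columns real_columns.length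

-- ===== PRECONDITION & SPEC =====
def Spec_check_DrCramountSameColumn (real_columns : List String) (out : Bool × Int) : Prop := out = check_DrCramountSameColumn_alt real_columns
instance (real_columns : List String) (out : Bool × Int) : Decidable (Spec_check_DrCramountSameColumn real_columns out) := by unfold Spec_check_DrCramountSameColumn; infer_instance

-- ===== CLAIM (what is proved, stated in full; the proofs are below) =====
def Claim_equal_check_DrCramountSameColumn : Prop := ∀ (real_columns : List String), Dom_check_DrCramountSameColumn real_columns → Spec_check_DrCramountSameColumn real_columns (check_DrCramountSameColumn real_columns)

-- ===== LEMMAS AND PROOFS =====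

-- indices below n read the same element after appending one string at the end
theorem pvAltGo_append (ys : List String) (c : String) (n : Nat) (hn : n ≤ ys.length) :
    pvAltGo (ys ++ [c]) n = pvAltGo ys n := by
  induction n with
  | zero => rfl
  | succ m ih =>
    have hm : m < ys.length := by omega
    have hget : PySem.List.pyGetD (ys ++ [c]) (m : Int) "" = PySem.List.pyGetD ys (m : Int) "" := by
      simp [PySem.List.pyGetD_natCast, hm, List.getD,
        List.getElem?_append_left hm]
    simp only [pvAltGo, hget, ih (by omega)]

theorem pvPorts_eq (xs : List String) :
    check_DrCramountSameColumn xs = check_DrCramountSameColumn_alt xs := by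
  induction xs using List.reverseRecOn with
  | nil => rfl
  | append_singleton ys c ih =>
    unfold check_DrCramountSameColumn check_DrCramountSameColumn_alt
    rw [PySem.List.enumerate_append, List.foldl_append]
    have hlen : (ys ++ [c]).length = ys.length + 1 := by simp
    rw [hlen]
    have hget : PySem.List.pyGetD (ys ++ [c]) ((ys.length : Nat) : Int) "" = c := by
      simp [PySem.List.pyGetD_natCast, List.getD]
    simp only [pvAltGo, hget, PySem.List.enumerate, List.foldl]
    split_ifs with h
    · norm_num
    · rw [pvAltGo_append ys c ys.length le_rfl]
      simpa [check_DrCramountSameColumn, check_DrCramountSameColumn_alt] using ih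

-- ===== VERDICT (by name: the statement is the Claim_ definition above) =====
theorem check_DrCramountSameColumn_spec : Claim_equal_check_DrCramountSameColumn := by
  intro xs _
  unfold Spec_check_DrCramountSameColumn
  exact pvPorts_eq xs
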